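-- pv_equiv track=rewrite | github.com/s-4-m-a-n/Booth-s-multiplication | booth's algorithm.py | binaryAdder
-- ===== SOURCE A (Python) =====
-- def binaryAdder(x,y,cin,i):
-- 	#	i=len(x)-1
-- 		i=i-1
-- 		if i<0:        # termination candition
-- 			return x
--
-- 		sum=x[i]+y[i]+cin
-- 		x[i]=sum%2
--
-- 		if sum==2 or sum==3:
-- 			return binaryAdder(x,y,1,i)
-- 		else:
-- 			return binaryAdder(x,y,0,i)
-- ===== SOURCE B (Python) =====
-- def binaryAdder(x, y, cin, i):
--     # Iterative rewrite: one loop from i-1 down to 0 with a local carry,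
--     # mutating the same list x in place (same side effect as A) and returning it.
--     carry = cin
--     for j in range(i - 1, -1, -1):
--         s = x[j] + y[j] + carry
--         x[j] = s % 2
--         carry = 1 if s in (2, 3) else 0
--     return x
-- ===== Notes on version B (the rewrite author's own statement) =====
-- stated objective: simpler
-- what changed: Replaced the tail recursion (one recursive call per bit, re-entering the function with a decremented index and the carry as an argument) by a single explicit for-loop over range(i-1,-1,-1) with a local carry variable.
import Mathlib
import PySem

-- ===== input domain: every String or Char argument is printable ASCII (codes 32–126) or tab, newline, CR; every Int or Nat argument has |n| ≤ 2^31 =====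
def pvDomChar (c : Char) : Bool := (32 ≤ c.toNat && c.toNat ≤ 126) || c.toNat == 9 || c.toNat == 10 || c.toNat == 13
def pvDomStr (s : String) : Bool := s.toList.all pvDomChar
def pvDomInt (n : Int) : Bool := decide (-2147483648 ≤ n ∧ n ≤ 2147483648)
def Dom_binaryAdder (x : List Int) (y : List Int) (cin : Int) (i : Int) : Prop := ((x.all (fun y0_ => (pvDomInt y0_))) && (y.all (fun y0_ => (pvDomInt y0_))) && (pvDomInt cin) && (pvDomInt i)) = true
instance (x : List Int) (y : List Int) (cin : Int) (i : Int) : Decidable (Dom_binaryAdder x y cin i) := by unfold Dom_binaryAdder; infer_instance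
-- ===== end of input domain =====

-- B replaces A's tail recursion by one explicit loop over range(i-1,-1,-1) with a local carry
-- (objective: simpler); both mutate/return the same list x — equivalence proved on the return value.


-- ===== PORT A =====
-- literal port of A: decrement i, stop when negative, else read x[i], y[i]
-- (in range under Pre_), write x[i] = sum % 2 and recurse with carry 1 or 0
def binaryAdder (x : List Int) (y : List Int) (cin : Int) (i : Int) : List Int :=
  if _h : i - 1 < 0 then x
  else
    let s := PySem.List.pyGetD x (i - 1) 0 + PySem.List.pyGetD y (i - 1) 0 + cin
    let x' := PySem.List.pySetD x (i - 1) (PySem.Int.mod s 2)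
    if s = 2 ∨ s = 3 then binaryAdder x' y 1 (i - 1) else binaryAdder x' y 0 (i - 1)
termination_by i.toNat
decreasing_by all_goals omega

-- ===== PORT B =====
-- port of B: one fold over range(i-1, -1, -1) carrying the pair (x, carry)
def binaryAdder_alt (x : List Int) (y : List Int) (cin : Int) (i : Int) : List Int :=
  ((PySem.List.pyRange (i - 1) (-1) (-1)).foldl
    (fun (st : List Int × Int) j =>
      let s := PySem.List.pyGetD st.1 j 0 + PySem.List.pyGetD y j 0 + st.2
      (PySem.List.pySetD st.1 j (PySem.Int.mod s 2), if s = 2 ∨ s = 3 then 1 else 0))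
    (x, cin)).1

-- ===== PRECONDITION & SPEC =====
-- Pre_ excludes exactly the inputs where Python A raises IndexError: it reads x[i-1] … x[0]
-- and y[i-1] … y[0], so both lists must have length ≥ i.
def Pre_binaryAdder (x : List Int) (y : List Int) (cin : Int) (i : Int) : Prop :=
  i ≤ (x.length : Int) ∧ i ≤ (y.length : Int)
instance (x : List Int) (y : List Int) (cin : Int) (i : Int) : Decidable (Pre_binaryAdder x y cin i) := by unfold Pre_binaryAdder; infer_instance
def pvWitness_binaryAdder : List Int × List Int × Int × Int := ([1, 0, 1], [0, 1, 1], 0, 3)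
def Spec_binaryAdder (x : List Int) (y : List Int) (cin : Int) (i : Int) (out : List Int) : Prop := out = binaryAdder_alt x y cin i
instance (x : List Int) (y : List Int) (cin : Int) (i : Int) (out : List Int) : Decidable (Spec_binaryAdder x y cin i out) := by unfold Spec_binaryAdder; infer_instance

-- ===== CLAIM (what is proved, stated in full; the proofs are below) =====
def Claim_equal_binaryAdder : Prop := ∀ (x : List Int) (y : List Int) (cin : Int) (i : Int), Dom_binaryAdder x y cin i → Pre_binaryAdder x y cin i → Spec_binaryAdder x y cin i (binaryAdder x y cin i)

-- ===== LEMMAS AND PROOFS =====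
-- B satisfies A's recursion: peeling the head of the countdown range is one loop body step.
lemma binaryAdder_alt_step (x y : List Int) (cin i : Int) (h : ¬ i - 1 < 0) :
    binaryAdder_alt x y cin i =
      (let s := PySem.List.pyGetD x (i - 1) 0 + PySem.List.pyGetD y (i - 1) 0 + cin
       binaryAdder_alt (PySem.List.pySetD x (i - 1) (PySem.Int.mod s 2)) y
         (if s = 2 ∨ s = 3 then 1 else 0) (i - 1)) := by
  unfold binaryAdder_alt
  rw [PySem.List.pyRange_neg_one_cons (by omega : (-1 : Int) < i - 1)]
  simp only [List.foldl_cons]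


lemma binaryAdder_eq_alt (y : List Int) :
    ∀ (n : Nat) (i : Int), i.toNat = n → ∀ (x : List Int) (cin : Int),
      binaryAdder x y cin i = binaryAdder_alt x y cin i := by
  intro n
  induction n with
  | zero =>
    intro i hi x cin
    have h : i - 1 < 0 := by omega
    rw [binaryAdder, binaryAdder_alt, dif_pos h,
      PySem.List.pyRange_neg_one_eq_nil (by omega : i - 1 ≤ -1)]
    simp
  | succ m ih =>
    intro i hi x cin
    by_cases h : i - 1 < 0
    · rw [binaryAdder, binaryAdder_alt, dif_pos h,
        PySem.List.pyRange_neg_one_eq_nil (by omega : i - 1 ≤ -1)]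
      simp
    · rw [binaryAdder, dif_neg h, binaryAdder_alt_step x y cin i h]
      simp only []
      split_ifs with hs
      · simpa [hs] using ih (i - 1) (by omega) _ 1
      · simpa [hs] using ih (i - 1) (by omega) _ 0

-- ===== VERDICT (by name: the statement is the Claim_ definition above) =====
theorem binaryAdder_spec : Claim_equal_binaryAdder := by
  intro x y cin i _hd _hp
  exact binaryAdder_eq_alt y i.toNat i rfl x cin
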